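-- pv_equiv track=rewrite | github.com/ericmerle3789/Collatz-Junction-Theorem | scripts/research/r23_continued_fraction.py | R0_forward
-- ===== SOURCE A (Python) =====
-- def R0_forward(deltas, g, mod=None):
--     """
--     FORWARD affine recurrence:
--     alpha_0 = 1, alpha_j = 2^{delta_j} * g * alpha_{j-1} + 1.
--     This computes P_C(g) where C_j = sum(deltas[j:]) (reverse cumsum).
--     """
--     alpha = 1
--     for dj in deltas:
--         a = (2**dj) * g
--         if mod is not None:
--             a = a % mod
--             alpha = (a * alpha + 1) % mod
--         else:
--             alpha = a * alpha + 1
--     return alpha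
-- ===== SOURCE B (Python) =====
-- def R0_forward(deltas, g, mod=None):
--     """
--     Same value, computed in two stages instead of a forward affine recurrence:
--     first a backward pass builds the suffix sums S_i = sum(deltas[i:]),
--     then the result is the sum of the closed-form terms 2**S_i * g**(n-i)
--     accumulated onto 1 (reducing mod after each addition if mod is given).
--     """
--     n = len(deltas)
--     suf = [0] * (n + 1)
--     for i in range(n - 1, -1, -1):
--         suf[i] = deltas[i] + suf[i + 1]
--     total = 1
--     for i in range(n):
--         term = 2 ** suf[i] * g ** (n - i)
--         if mod is not None:
--             total = (total + term) % mod
--         else: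
--             total += term
--     return total
-- ===== Notes on version B (the rewrite author's own statement) =====
-- stated objective: alternative
-- what changed: B replaces A's single forward affine accumulator by two stages: a backward pass computing the suffix sums S_i of deltas, then a summation of the closed-form terms 2**S_i * g**(n-i) onto 1 (reduced mod per addition).
-- outside the precondition, e.g. on R0_forward([-2, -2], -3, 2): A returns 1.3125, B returns 0.8125; on R0_forward([-1], 3, 7): A returns 2.5, B returns 2.5; on R0_forward([1], 3, 0): A raises ZeroDivisionError, B raises ZeroDivisionError
import Mathlib
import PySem

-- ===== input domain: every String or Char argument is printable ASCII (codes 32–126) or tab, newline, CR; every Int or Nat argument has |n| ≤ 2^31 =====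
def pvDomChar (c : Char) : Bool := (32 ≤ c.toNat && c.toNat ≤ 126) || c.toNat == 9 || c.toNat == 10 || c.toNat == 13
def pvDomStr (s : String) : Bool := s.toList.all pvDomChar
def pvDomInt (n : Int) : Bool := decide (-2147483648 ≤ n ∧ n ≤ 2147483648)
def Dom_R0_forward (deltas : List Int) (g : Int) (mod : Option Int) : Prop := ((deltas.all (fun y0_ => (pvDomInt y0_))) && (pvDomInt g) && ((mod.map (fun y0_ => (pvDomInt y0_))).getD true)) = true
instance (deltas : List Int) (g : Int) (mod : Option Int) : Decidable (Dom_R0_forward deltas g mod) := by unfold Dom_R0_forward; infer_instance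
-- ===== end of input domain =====

-- B computes the same value as A's forward affine recurrence in two stages: a backward
-- pass of suffix sums, then a sum of closed-form power terms (objective: alternative).

-- ===== PORT A =====
-- forward loop, one accumulator alpha; '2**dj' is exact for dj ≥ 0 (Pre_ requires it)
def R0_forward (deltas : List Int) (g : Int) (mod : Option Int) : Int :=
  deltas.foldl (fun alpha dj =>
    let a := (2 : Int) ^ dj.toNat * g
    match mod with
    | none => a * alpha + 1
    | some m =>
      let a' := PySem.Int.mod a m
      PySem.Int.mod (a' * alpha + 1) m) 1

-- ===== PORT B =====
-- backward pass building the suffix-sum list suf (suf[i] = deltas[i] + suf[i+1], suf[n] = 0),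
-- built back-to-front exactly as Source B's reverse-index loop fills it
def pvSuf : List Int → List Int
  | [] => [0]
  | d :: l => (d + (pvSuf l).headI) :: pvSuf l

-- then the index loop summing the terms 2**suf[i] * g**(n-i) onto 1;
-- '2**suf[i]' is exact for suf[i] ≥ 0 (Pre_ requires all deltas ≥ 0)
def R0_forward_alt (deltas : List Int) (g : Int) (mod : Option Int) : Int :=
  let n := deltas.length
  let suf := pvSuf deltas
  (List.range n).foldl (fun total i =>
    let term := (2 : Int) ^ ((suf.getD i 0).toNat) * g ^ (n - i)
    match mod with
    | none => total + term
    | some m => PySem.Int.mod (total + term) m) 1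

-- ===== PRECONDITION & SPEC =====
-- Pre_ excludes a negative delta (Python's '2**dj' then yields a float, so A returns a
-- non-int value) and mod = 0 (A raises ZeroDivisionError).
def Pre_R0_forward (deltas : List Int) (g : Int) (mod : Option Int) : Prop :=
  (∀ d ∈ deltas, 0 ≤ d) ∧ mod ≠ some 0
instance (deltas : List Int) (g : Int) (mod : Option Int) : Decidable (Pre_R0_forward deltas g mod) := by unfold Pre_R0_forward; infer_instance

def pvWitness_R0_forward : List Int × Int × Option Int := ([2, 0, 3], 5, some 7)

def Spec_R0_forward (deltas : List Int) (g : Int) (mod : Option Int) (out : Int) : Prop := out = R0_forward_alt deltas g mod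
instance (deltas : List Int) (g : Int) (mod : Option Int) (out : Int) : Decidable (Spec_R0_forward deltas g mod out) := by unfold Spec_R0_forward; infer_instance

-- ===== CLAIM (what is proved, stated in full; the proofs are below) =====
def Claim_equal_R0_forward : Prop := ∀ (deltas : List Int) (g : Int) (mod : Option Int), Dom_R0_forward deltas g mod → Pre_R0_forward deltas g mod → Spec_R0_forward deltas g mod (R0_forward deltas g mod)

-- ===== LEMMAS AND PROOFS =====

-- the per-step factor, A's pure step, the product of a whole list of factors,
-- the sum of suffix products, and B's closed-form term
def pvA (g d : Int) : Int := (2 : Int) ^ d.toNat * g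
def pvStepA (g x d : Int) : Int := pvA g d * x + 1
def pvP (g : Int) (l : List Int) : Int := (l.map (pvA g)).prod
def pvQ (g : Int) : List Int → Int
  | [] => 0
  | _ :: l => pvP g l + pvQ g l
def pvT (g : Int) (l : List Int) (i : Nat) : Int :=
  (2 : Int) ^ (((pvSuf l).getD i 0).toNat) * g ^ (l.length - i)

-- A's pure (no-mod) fold, closed form
theorem pvA_closed (g : Int) (l : List Int) : ∀ x : Int,
    l.foldl (pvStepA g) x = x * pvP g l + pvQ g l := by
  induction l with
  | nil => intro x; simp [pvP, pvQ]
  | cons d l ih =>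
    intro x
    simp only [List.foldl_cons]
    rw [ih (pvStepA g x d)]
    simp only [pvStepA, pvP, pvQ, List.map_cons, List.prod_cons]
    ring

theorem pvSuf_headI (l : List Int) : (pvSuf l).headI = l.sum := by
  induction l with
  | nil => simp [pvSuf]
  | cons d l ih => simp [pvSuf, ih]

theorem pvSum_nonneg (l : List Int) (h : ∀ d ∈ l, 0 ≤ d) : 0 ≤ l.sum := by
  induction l with
  | nil => simp
  | cons d l ih =>
    simp only [List.sum_cons]
    have := h d (by simp)
    have := ih (fun e he => h e (by simp [he]))
    omega

theorem pvP_pow (g : Int) (l : List Int) (h : ∀ d ∈ l, 0 ≤ d) :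
    pvP g l = (2 : Int) ^ l.sum.toNat * g ^ l.length := by
  induction l with
  | nil => simp [pvP]
  | cons d l ih =>
    have hd := h d (by simp)
    have hs := pvSum_nonneg l (fun e he => h e (by simp [he]))
    have htn : (d + l.sum).toNat = d.toNat + l.sum.toNat := by omega
    simp only [pvP, List.map_cons, List.prod_cons, List.sum_cons, List.length_cons]
    rw [show ((l.map (pvA g)).prod) = pvP g l from rfl, ih (fun e he => h e (by simp [he])),
      htn, pow_add, pow_succ]
    simp only [pvA]
    ring

-- the sum of B's closed-form terms equals P + Q (all deltas nonnegative)
theorem pvT_sum (g : Int) (l : List Int) (h : ∀ d ∈ l, 0 ≤ d) :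
    1 + ((List.range l.length).map (pvT g l)).sum = pvP g l + pvQ g l := by
  induction l with
  | nil => simp [pvP, pvQ]
  | cons d l ih =>
    have hshift : ((List.range l.length).map Nat.succ).map (pvT g (d :: l))
        = (List.range l.length).map (pvT g l) := by
      rw [List.map_map]
      refine List.map_congr_left (fun i _ => ?_)
      simp [pvT, pvSuf]
    have h0 : pvT g (d :: l) 0 = pvA g d * pvP g l := by
      have hd := h d (by simp)
      have hs := pvSum_nonneg l (fun e he => h e (by simp [he]))
      have htn : (d + l.sum).toNat = d.toNat + l.sum.toNat := by omega
      simp only [pvT, pvSuf, List.getD_cons_zero, pvSuf_headI, List.length_cons,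
        Nat.sub_zero, pvA]
      rw [pvP_pow g l (fun e he => h e (by simp [he])), htn, pow_add, pow_succ]
      ring
    have ihl := ih (fun e he => h e (by simp [he]))
    simp only [List.length_cons, List.range_succ_eq_map, List.map_cons, List.sum_cons, hshift, h0]
    simp only [pvP, pvQ, List.map_cons, List.prod_cons]
    rw [show ((l.map (pvA g)).prod) = pvP g l from rfl]
    linarith [ihl]

-- Python '%' maps a value into its residue class …
theorem pvmod_modEq (a m : Int) : PySem.Int.mod a m ≡ a [ZMOD m] := by
  rw [Int.modEq_iff_dvd]
  have h := PySem.Int.floordiv_mul_add_mod a m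
  exact ⟨PySem.Int.floordiv a m, by linear_combination -h⟩

-- … and is constant on residue classes (m ≠ 0)
theorem pvmod_congr {m : Int} (hm : m ≠ 0) {a b : Int} (h : a ≡ b [ZMOD m]) :
    PySem.Int.mod a m = PySem.Int.mod b m := by
  have hd : m ∣ (PySem.Int.mod b m - PySem.Int.mod a m) :=
    Int.ModEq.dvd (((pvmod_modEq a m).trans h).trans (pvmod_modEq b m).symm)
  have hd' : |m| ∣ (PySem.Int.mod b m - PySem.Int.mod a m) := (abs_dvd _ _).mpr hd
  have habs : |PySem.Int.mod b m - PySem.Int.mod a m| < |m| := by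
    rcases lt_or_gt_of_ne hm with hneg | hpos
    · have h1 := PySem.Int.mod_neg_bounds a hneg
      have h2 := PySem.Int.mod_neg_bounds b hneg
      rw [abs_of_neg hneg, abs_lt]
      constructor <;> linarith [h1.1, h1.2, h2.1, h2.2]
    · have h1 := PySem.Int.mod_nonneg a hpos
      have h2 := PySem.Int.mod_lt a hpos
      have h3 := PySem.Int.mod_nonneg b hpos
      have h4 := PySem.Int.mod_lt b hpos
      rw [abs_of_pos hpos, abs_lt]
      constructor <;> linarith
  have := Int.eq_zero_of_abs_lt_dvd hd' habs
  omega

theorem pvmod_idem {m : Int} (hm : m ≠ 0) (a : Int) :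
    PySem.Int.mod (PySem.Int.mod a m) m = PySem.Int.mod a m :=
  pvmod_congr hm (pvmod_modEq a m)

-- A's mod fold is congruent to the pure fold
theorem pvAm_cong (g m : Int) (l : List Int) : ∀ x y : Int, x ≡ y [ZMOD m] →
    l.foldl (fun alpha d => PySem.Int.mod (PySem.Int.mod (pvA g d) m * alpha + 1) m) x
      ≡ l.foldl (pvStepA g) y [ZMOD m] := by
  induction l with
  | nil => intro x y h; simpa using h
  | cons d l ih =>
    intro x y h
    simp only [List.foldl_cons]
    apply ih
    calc PySem.Int.mod (PySem.Int.mod (pvA g d) m * x + 1) m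
        ≡ PySem.Int.mod (pvA g d) m * x + 1 [ZMOD m] := pvmod_modEq _ m
      _ ≡ pvA g d * y + 1 [ZMOD m] := Int.ModEq.add_right 1 ((pvmod_modEq (pvA g d) m).mul h)

-- after at least one step, A's mod accumulator is a '%'-image (so it is fixed by '%')
theorem pvAm_reduced (g m : Int) (hm : m ≠ 0) (l : List Int) : ∀ x : Int, l ≠ [] →
    PySem.Int.mod (l.foldl (fun alpha d => PySem.Int.mod (PySem.Int.mod (pvA g d) m * alpha + 1) m) x) m
      = l.foldl (fun alpha d => PySem.Int.mod (PySem.Int.mod (pvA g d) m * alpha + 1) m) x := by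
  induction l with
  | nil => intro x hx; exact absurd rfl hx
  | cons d l ih =>
    intro x _
    cases l with
    | nil => simpa using pvmod_idem hm _
    | cons e l' => simp only [List.foldl_cons] at *; exact ih _ (by simp)

-- B's mod loop is congruent to the pure summing loop (generic term function)
theorem pvBm_cong (f : Nat → Int) (m : Int) (is : List Nat) : ∀ t t' : Int, t ≡ t' [ZMOD m] →
    is.foldl (fun tot i => PySem.Int.mod (tot + f i) m) t
      ≡ is.foldl (fun tot i => tot + f i) t' [ZMOD m] := by
  induction is with
  | nil => intro t t' h; simpa using h
  | cons i is ih =>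
    intro t t' h
    simp only [List.foldl_cons]
    exact ih _ _ ((pvmod_modEq _ m).trans (h.add_right (f i)))

-- after at least one addition, B's accumulator is a '%'-image (so it is fixed by '%')
theorem pvBm_reduced (f : Nat → Int) (m : Int) (hm : m ≠ 0) (is : List Nat) : ∀ t : Int, is ≠ [] →
    PySem.Int.mod (is.foldl (fun tot i => PySem.Int.mod (tot + f i) m) t) m
      = is.foldl (fun tot i => PySem.Int.mod (tot + f i) m) t := by
  induction is with
  | nil => intro t hx; exact absurd rfl hx
  | cons i is ih =>
    intro t _
    cases is with
    | nil => simpa using pvmod_idem hm _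
    | cons j is' => simp only [List.foldl_cons] at *; exact ih _ (by simp)

-- ===== VERDICT (by name: the statement is the Claim_ definition above) =====
theorem R0_forward_spec : Claim_equal_R0_forward := by
  intro deltas g mod _ hpre
  unfold Spec_R0_forward
  have hnn : ∀ d ∈ deltas, 0 ≤ d := hpre.1
  cases mod with
  | none =>
    show deltas.foldl (pvStepA g) 1
        = (List.range deltas.length).foldl (fun tot i => tot + pvT g deltas i) 1
    rw [pvA_closed g deltas 1, PySem.List.foldl_add, pvT_sum g deltas hnn]
    ring
  | some m =>
    have hm : m ≠ 0 := fun h => hpre.2 (by rw [h])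
    cases deltas with
    | nil => rfl
    | cons d l =>
      show (d :: l).foldl (fun alpha e => PySem.Int.mod (PySem.Int.mod (pvA g e) m * alpha + 1) m) 1
          = (List.range (d :: l).length).foldl
              (fun tot i => PySem.Int.mod (tot + pvT g (d :: l) i) m) 1
      have hne : List.range (d :: l).length ≠ [] := by simp
      have hB : (List.range (d :: l).length).foldl (fun tot i => tot + pvT g (d :: l) i) 1
          = (d :: l).foldl (pvStepA g) 1 := by
        rw [pvA_closed g (d :: l) 1, PySem.List.foldl_add, pvT_sum g (d :: l) hnn]
        ring
      have hcong : (d :: l).foldl (fun alpha e => PySem.Int.mod (PySem.Int.mod (pvA g e) m * alpha + 1) m) 1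
          ≡ (List.range (d :: l).length).foldl
              (fun tot i => PySem.Int.mod (tot + pvT g (d :: l) i) m) 1 [ZMOD m] := by
        have hA := pvAm_cong g m (d :: l) 1 1 (Int.ModEq.refl 1)
        have hBc := pvBm_cong (pvT g (d :: l)) m (List.range (d :: l).length) 1 1 (Int.ModEq.refl 1)
        rw [hB] at hBc
        exact hA.trans hBc.symm
      calc (d :: l).foldl (fun alpha e => PySem.Int.mod (PySem.Int.mod (pvA g e) m * alpha + 1) m) 1
          = PySem.Int.mod ((d :: l).foldl (fun alpha e => PySem.Int.mod (PySem.Int.mod (pvA g e) m * alpha + 1) m) 1) m :=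
            (pvAm_reduced g m hm (d :: l) 1 (by simp)).symm
        _ = PySem.Int.mod ((List.range (d :: l).length).foldl
              (fun tot i => PySem.Int.mod (tot + pvT g (d :: l) i) m) 1) m := pvmod_congr hm hcong
        _ = _ := pvBm_reduced (pvT g (d :: l)) m hm (List.range (d :: l).length) 1 hne
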